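-- pv_equiv track=rewrite | github.com/ChenshuoDu/CS526homework | homework5/q3/q3.py | solve
-- ===== SOURCE A (Python) =====
-- def solve(A, B, startA):
--     n, m = len(A), len(B)
--     d1 = [1] * n
--     d2 = [1] * m
--
--     for j in range(m):
--         for i in range(n):
--             if startA:
--                 if B[j] < A[i] and j < i:
--                     d1[i] = max(d1[i], d2[j] + 1)
--                 if A[i] < B[j] and i < j:
--                     d2[j] = max(d2[j], d1[i] + 1)
--             else:
--                 if A[i] < B[j] and i < j:
--                     d2[j] = max(d2[j], d1[i] + 1)
--                 if B[j] < A[i] and j < i: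
--                     d1[i] = max(d1[i], d2[j] + 1)
--
--     return max(max(d1), max(d2))
-- ===== SOURCE B (Python) =====
-- def solve(A, B, startA):
--     # startA is irrelevant: the two update conditions (j < i vs i < j) are mutually
--     # exclusive, so the branch order inside A's loop never matters.
--     # Each final DP value is computed exactly once, in merged-index order:
--     # d1[k] / d2[k] only depend on finished values with strictly smaller index.
--     n, m = len(A), len(B)
--     d1 = []
--     d2 = []
--     for k in range(max(n, m)):
--         if k < n:
--             best = 0
--             for j in range(min(k, m)):
--                 if B[j] < A[k] and d2[j] > best:
--                     best = d2[j]
--             d1.append(best + 1)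
--         if k < m:
--             best = 0
--             for i in range(min(k, n)):
--                 if A[i] < B[k] and d1[i] > best:
--                     best = d1[i]
--             d2.append(best + 1)
--     return max(d1 + d2)
-- ===== Notes on version B (the rewrite author's own statement) =====
-- stated objective: alternative
-- what changed: B computes each DP value exactly once in merged-index dependency order (one sweep appending final d1[k]/d2[k] obtained from strict-prefix scans, dropping the provably irrelevant startA branch), instead of A's relaxation over all m*n (j,i) pairs with in-place max updates.
import Mathlib
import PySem

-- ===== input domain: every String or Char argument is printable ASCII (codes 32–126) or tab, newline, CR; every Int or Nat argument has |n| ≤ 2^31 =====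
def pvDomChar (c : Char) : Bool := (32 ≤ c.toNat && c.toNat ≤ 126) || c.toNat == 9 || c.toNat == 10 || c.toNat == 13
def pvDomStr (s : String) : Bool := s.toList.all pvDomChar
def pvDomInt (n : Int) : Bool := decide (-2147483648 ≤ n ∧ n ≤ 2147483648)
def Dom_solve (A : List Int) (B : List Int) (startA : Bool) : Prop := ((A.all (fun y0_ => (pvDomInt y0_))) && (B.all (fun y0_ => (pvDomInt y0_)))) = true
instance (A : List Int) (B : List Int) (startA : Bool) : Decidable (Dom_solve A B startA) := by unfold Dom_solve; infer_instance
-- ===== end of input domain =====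

-- B replaces A's m×n relaxation sweep (in-place max updates over every (j,i) pair, with a
-- startA branch that only swaps the two updates) by a single merged-index sweep that computes
-- each DP value exactly once from strict-prefix scans; ~constant-factor faster, no startA branch.

-- ===== PORT A =====
-- one (j,i) pair of A's inner loop, both startA orders, literally as in the Python
def aPair (A B : List Int) (startA : Bool) (j : ℕ) (s : List Int × List Int) (i : ℕ) :
    List Int × List Int :=
  if startA then
    let d1 := if B.getD j 0 < A.getD i 0 ∧ j < i then
                s.1.set i (max (s.1.getD i 0) (s.2.getD j 0 + 1)) else s.1
    let d2 := if A.getD i 0 < B.getD j 0 ∧ i < j then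
                s.2.set j (max (s.2.getD j 0) (d1.getD i 0 + 1)) else s.2
    (d1, d2)
  else
    let d2 := if A.getD i 0 < B.getD j 0 ∧ i < j then
                s.2.set j (max (s.2.getD j 0) (s.1.getD i 0 + 1)) else s.2
    let d1 := if B.getD j 0 < A.getD i 0 ∧ j < i then
                s.1.set i (max (s.1.getD i 0) (d2.getD j 0 + 1)) else s.1
    (d1, d2)

def solve (A : List Int) (B : List Int) (startA : Bool) : Int :=
  let n := A.length
  let m := B.length
  let s := (List.range m).foldl
      (fun s j => (List.range n).foldl (aPair A B startA j) s)
      (List.replicate n 1, List.replicate m 1)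
  max ((PySem.List.max? s.1 (fun y => y)).getD 0)
      ((PySem.List.max? s.2 (fun y => y)).getD 0)

-- ===== PORT B =====
-- best = 0; for j in range(t): if xs[j] < x and d[j] > best: best = d[j]
def bScan (xs : List Int) (x : Int) (d : List Int) (t : ℕ) : Int :=
  (List.range t).foldl
    (fun best j => if xs.getD j 0 < x ∧ d.getD j 0 > best then d.getD j 0 else best) 0

-- one iteration of B's sweep over the merged index k
def bStep (A B : List Int) (n m : ℕ) (s : List Int × List Int) (k : ℕ) :
    List Int × List Int :=
  let d1 := if k < n then s.1 ++ [bScan B (A.getD k 0) s.2 (min k m) + 1] else s.1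
  let d2 := if k < m then s.2 ++ [bScan A (B.getD k 0) d1 (min k n) + 1] else s.2
  (d1, d2)

def solve_alt (A : List Int) (B : List Int) (startA : Bool) : Int :=
  let n := A.length
  let m := B.length
  let s := (List.range (max n m)).foldl (bStep A B n m) ([], [])
  (PySem.List.max? (s.1 ++ s.2) (fun y => y)).getD 0

-- ===== PRECONDITION & SPEC =====
-- A raises ValueError (max of an empty list) when A or B is empty; excluded here.
def Pre_solve (A : List Int) (B : List Int) (startA : Bool) : Prop := A ≠ [] ∧ B ≠ []
instance (A : List Int) (B : List Int) (startA : Bool) : Decidable (Pre_solve A B startA) := by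
  unfold Pre_solve; infer_instance
def pvWitness_solve : List Int × List Int × Bool := ([1, 3], [2], true)

def Spec_solve (A : List Int) (B : List Int) (startA : Bool) (out : Int) : Prop :=
  out = solve_alt A B startA
instance (A : List Int) (B : List Int) (startA : Bool) (out : Int) : Decidable (Spec_solve A B startA out) := by
  unfold Spec_solve; infer_instance

-- ===== CLAIM (what is proved, stated in full; the proofs are below) =====
def Claim_equal_solve : Prop := ∀ (A : List Int) (B : List Int) (startA : Bool),
  Dom_solve A B startA → Pre_solve A B startA → Spec_solve A B startA (solve A B startA)


-- ===== LEMMAS AND PROOFS =====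

-- getD bookkeeping
theorem pvGetD_set_self (l : List Int) (i : ℕ) (v d : Int) (h : i < l.length) :
    (l.set i v).getD i d = v := by
  simp [List.getD_eq_getElem?_getD, h]

theorem pvGetD_set_ne (l : List Int) (i j : ℕ) (v d : Int) (h : i ≠ j) :
    (l.set i v).getD j d = l.getD j d := by
  simp [List.getD_eq_getElem?_getD, h]

theorem pvGetD_append_left (l l' : List Int) (i : ℕ) (d : Int) (h : i < l.length) :
    (l ++ l').getD i d = l.getD i d := by
  simp [List.getD_eq_getElem?_getD, List.getElem?_append_left h]

theorem pvGetD_concat_len (l : List Int) (x d : Int) (i : ℕ) (h : i = l.length) :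
    (l ++ [x]).getD i d = x := by
  subst h; simp [List.getD_eq_getElem?_getD]

-- B's sweep after K steps
def bb (A B : List Int) (K : ℕ) : List Int × List Int :=
  (List.range K).foldl (bStep A B A.length B.length) ([], [])

theorem bb_succ (A B : List Int) (K : ℕ) :
    bb A B (K + 1) = bStep A B A.length B.length (bb A B K) K := by
  simp [bb, List.range_succ]

theorem bb_len (A B : List Int) (K : ℕ) :
    (bb A B K).1.length = min K A.length ∧ (bb A B K).2.length = min K B.length := by
  induction K with
  | zero => simp [bb]
  | succ K ih =>
    obtain ⟨h1, h2⟩ := ih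
    rw [bb_succ]
    unfold bStep
    by_cases hn : K < A.length <;> by_cases hm : K < B.length <;>
      simp [hn, hm, h1, h2] <;> omega

-- entries already written are never changed again
theorem bb_mono1 (A B : List Int) {K K' i : ℕ} (hK : K ≤ K') (hi : i < min K A.length) :
    (bb A B K').1.getD i 0 = (bb A B K).1.getD i 0 := by
  induction K', hK using Nat.le_induction with
  | base => rfl
  | succ K' hKK ih =>
    rw [bb_succ]
    unfold bStep
    by_cases hn : K' < A.length <;> by_cases hm : K' < B.length <;>
      simp only [hn, hm, if_pos, if_neg, if_true, if_false] <;>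
      first
        | (rw [pvGetD_append_left ((bb A B K').1) _ i 0 (by rw [(bb_len A B K').1]; omega)]; exact ih)
        | exact ih

theorem bb_mono2 (A B : List Int) {K K' j : ℕ} (hK : K ≤ K') (hj : j < min K B.length) :
    (bb A B K').2.getD j 0 = (bb A B K).2.getD j 0 := by
  induction K', hK using Nat.le_induction with
  | base => rfl
  | succ K' hKK ih =>
    rw [bb_succ]
    unfold bStep
    by_cases hn : K' < A.length <;> by_cases hm : K' < B.length <;>
      simp only [hn, hm, if_pos, if_neg, if_true, if_false] <;>
      first
        | (rw [pvGetD_append_left ((bb A B K').2) _ j 0 (by rw [(bb_len A B K').2]; omega)]; exact ih)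
        | exact ih

-- the final DP values B computes
def F1 (A B : List Int) (k : ℕ) : Int := (bb A B (k + 1)).1.getD k 0
def F2 (A B : List Int) (k : ℕ) : Int := (bb A B (k + 1)).2.getD k 0

-- running max over the first t candidates, as an explicit fold over the final values
def c1 (A B : List Int) (t k : ℕ) : Int :=
  (List.range t).foldl
    (fun best j => if B.getD j 0 < A.getD k 0 ∧ F2 A B j > best then F2 A B j else best) 0
def c2 (A B : List Int) (t k : ℕ) : Int :=
  (List.range t).foldl
    (fun best i => if A.getD i 0 < B.getD k 0 ∧ F1 A B i > best then F1 A B i else best) 0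

theorem c1_succ (A B : List Int) (t k : ℕ) :
    c1 A B (t + 1) k =
      if B.getD t 0 < A.getD k 0 ∧ F2 A B t > c1 A B t k then F2 A B t else c1 A B t k := by
  simp [c1, List.range_succ]

theorem c2_succ (A B : List Int) (t k : ℕ) :
    c2 A B (t + 1) k =
      if A.getD t 0 < B.getD k 0 ∧ F1 A B t > c2 A B t k then F1 A B t else c2 A B t k := by
  simp [c2, List.range_succ]

theorem F1_eq (A B : List Int) {k : ℕ} (hk : k < A.length) :
    F1 A B k = c1 A B (min k B.length) k + 1 := by
  have hl := (bb_len A B k).1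
  unfold F1
  rw [bb_succ]
  unfold bStep
  by_cases hm : k < B.length <;>
    simp only [hk, hm, if_true, if_false, if_pos, if_neg] <;>
    · have hlk : (bb A B k).1.length = k := by omega
      rw [pvGetD_concat_len _ _ _ _ hlk.symm]
      unfold bScan c1
      congr 1
      refine PySem.List.foldl_congr_mem _ _ _ _ ?_
      intro acc j hj
      have hj' : j < min k B.length := by simpa using hj
      have : (bb A B k).2.getD j 0 = F2 A B j := by
        unfold F2
        exact bb_mono2 A B (K := j + 1) (K' := k) (j := j) (by omega) (by omega)
      rw [this]

theorem F2_eq (A B : List Int) {k : ℕ} (hk : k < B.length) :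
    F2 A B k = c2 A B (min k A.length) k + 1 := by
  have hl2 := (bb_len A B k).2
  have hl1 := (bb_len A B k).1
  unfold F2
  rw [bb_succ]
  unfold bStep
  by_cases hn : k < A.length <;>
    simp only [hk, hn, if_true, if_false, if_pos, if_neg] <;>
    · have hlk : (bb A B k).2.length = k := by omega
      rw [pvGetD_concat_len _ _ _ _ hlk.symm]
      unfold bScan c2
      congr 1
      refine PySem.List.foldl_congr_mem _ _ _ _ ?_
      intro acc i hi
      have hi' : i < min k A.length := by simpa using hi
      have hread0 : (bb A B k).1.getD i 0 = F1 A B i := by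
        unfold F1
        exact bb_mono1 A B (K := i + 1) (K' := k) (i := i) (by omega) (by omega)
      have hread : ∀ (x : Int), ((bb A B k).1 ++ [x]).getD i 0 = F1 A B i := by
        intro x
        rw [pvGetD_append_left ((bb A B k).1) _ i 0 (by omega), hread0]
      first
        | rw [hread _]
        | rw [hread0]

theorem bb_fin1 (A B : List Int) {i : ℕ} (hi : i < A.length) :
    (bb A B (max A.length B.length)).1.getD i 0 = F1 A B i :=
  bb_mono1 A B (K := i + 1) (K' := max A.length B.length) (i := i) (by omega) (by omega)

theorem bb_fin2 (A B : List Int) {j : ℕ} (hj : j < B.length) :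
    (bb A B (max A.length B.length)).2.getD j 0 = F2 A B j :=
  bb_mono2 A B (K := j + 1) (K' := max A.length B.length) (j := j) (by omega) (by omega)

-- invariant of A's inner loop during outer iteration J, after inner steps 0..I-1
def innerInv (A B : List Int) (J I : ℕ) (s : List Int × List Int) : Prop :=
  s.1.length = A.length ∧ s.2.length = B.length ∧
  (∀ i < A.length, s.1.getD i 0 = c1 A B (if i < I then min (J + 1) i else min J i) i + 1) ∧
  (∀ j < B.length, j ≠ J → s.2.getD j 0 = if j < J then F2 A B j else 1) ∧
  s.2.getD J 0 = c2 A B (min I J) J + 1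

theorem aPair_inv (A B : List Int) (startA : Bool) {J I : ℕ}
    (hJ : J < B.length) (hI : I < A.length) {s : List Int × List Int}
    (h : innerInv A B J I s) : innerInv A B J (I + 1) (aPair A B startA J s I) := by
  obtain ⟨hl1, hl2, h1, h2, h2J⟩ := h
  rcases Nat.lt_trichotomy J I with hJI | rfl | hIJ
  · -- J < I : only the d1 update can fire
    have hnc2 : ¬ (A.getD I 0 < B.getD J 0 ∧ I < J) := by rintro ⟨_, hx⟩; omega
    have hstep : aPair A B startA J s I =
        (if B.getD J 0 < A.getD I 0 ∧ J < I then
            s.1.set I (max (s.1.getD I 0) (s.2.getD J 0 + 1)) else s.1, s.2) := by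
      cases startA <;> simp [aPair, hJI, (show ¬ I < J by omega)]
    have hsJ : s.2.getD J 0 = F2 A B J := by
      rw [h2J, Nat.min_eq_right (by omega), F2_eq A B hJ, Nat.min_eq_left (by omega)]
    have hsI : s.1.getD I 0 = c1 A B J I + 1 := by
      have hx := h1 I hI
      rwa [if_neg (lt_irrefl I), Nat.min_eq_left (by omega)] at hx
    rw [hstep]
    by_cases hc : B.getD J 0 < A.getD I 0
    · rw [if_pos ⟨hc, hJI⟩]
      refine ⟨by simp [hl1], hl2, ?_, fun j hj hje => h2 j hj hje, ?_⟩
      · intro i hi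
        by_cases hiI : i = I
        · subst hiI
          rw [pvGetD_set_self _ _ _ _ (by omega), hsI, hsJ,
              if_pos (Nat.lt_succ_self i), Nat.min_eq_left (by omega), c1_succ]
          by_cases hgt : F2 A B J > c1 A B J i
          · rw [if_pos ⟨hc, hgt⟩]; omega
          · rw [if_neg (by tauto)]; omega
        · rw [pvGetD_set_ne _ _ _ _ _ (fun hx => hiI hx.symm), h1 i hi]
          have harg : (if i < I + 1 then min (J + 1) i else min J i)
              = (if i < I then min (J + 1) i else min J i) := by
            split_ifs <;> omega
          rw [harg]
      · rw [h2J, Nat.min_eq_right (by omega), Nat.min_eq_right (by omega)]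
    · rw [if_neg (by tauto)]
      refine ⟨hl1, hl2, ?_, fun j hj hje => h2 j hj hje, ?_⟩
      · intro i hi
        rw [h1 i hi]
        by_cases hiI : i = I
        · subst hiI
          rw [if_neg (lt_irrefl i), if_pos (Nat.lt_succ_self i),
              Nat.min_eq_left (by omega), Nat.min_eq_left (by omega), c1_succ,
              if_neg (by tauto)]
        · have harg : (if i < I + 1 then min (J + 1) i else min J i)
              = (if i < I then min (J + 1) i else min J i) := by
            split_ifs <;> omega
          rw [harg]
      · rw [h2J, Nat.min_eq_right (by omega), Nat.min_eq_right (by omega)]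
  · -- J = I : neither update fires
    have hnc1 : ¬ (B.getD J 0 < A.getD J 0 ∧ J < J) := by rintro ⟨_, hx⟩; omega
    have hnc2 : ¬ (A.getD J 0 < B.getD J 0 ∧ J < J) := by rintro ⟨_, hx⟩; omega
    have hstep : aPair A B startA J s J = (s.1, s.2) := by
      cases startA <;> simp [aPair, lt_irrefl]
    rw [hstep]
    refine ⟨hl1, hl2, ?_, fun j hj hje => h2 j hj hje, ?_⟩
    · intro i hi
      rw [h1 i hi]
      have harg : (if i < J + 1 then min (J + 1) i else min J i)
          = (if i < J then min (J + 1) i else min J i) := by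
        split_ifs <;> omega
      rw [harg]
    · rw [h2J, Nat.min_self, Nat.min_eq_right (by omega)]
  · -- I < J : only the d2 update can fire
    have hnc1 : ¬ (B.getD J 0 < A.getD I 0 ∧ J < I) := by rintro ⟨_, hx⟩; omega
    have hstep : aPair A B startA J s I =
        (s.1, if A.getD I 0 < B.getD J 0 ∧ I < J then
            s.2.set J (max (s.2.getD J 0) (s.1.getD I 0 + 1)) else s.2) := by
      cases startA <;> simp [aPair, hIJ, (show ¬ J < I by omega)]
    have hsI : s.1.getD I 0 = F1 A B I := by
      have hx := h1 I hI
      rw [if_neg (lt_irrefl I), Nat.min_eq_right (by omega)] at hx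
      rw [hx, F1_eq A B hI, Nat.min_eq_left (by omega)]
    have harg1 : ∀ i, i < A.length →
        (if i < I + 1 then min (J + 1) i else min J i)
          = (if i < I then min (J + 1) i else min J i) := by
      intro i _; split_ifs <;> omega
    rw [hstep]
    by_cases hc : A.getD I 0 < B.getD J 0
    · rw [if_pos ⟨hc, hIJ⟩]
      refine ⟨hl1, by simp [hl2], ?_, ?_, ?_⟩
      · intro i hi; rw [h1 i hi, harg1 i hi]
      · intro j hj hje
        rw [pvGetD_set_ne _ _ _ _ _ (fun hx => hje hx.symm)]
        exact h2 j hj hje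
      · rw [pvGetD_set_self _ _ _ _ (by omega), h2J, Nat.min_eq_left (by omega), hsI,
            Nat.min_eq_left (by omega), c2_succ]
        by_cases hgt : F1 A B I > c2 A B I J
        · rw [if_pos ⟨hc, hgt⟩]; omega
        · rw [if_neg (by tauto)]; omega
    · rw [if_neg (by tauto)]
      refine ⟨hl1, hl2, ?_, fun j hj hje => h2 j hj hje, ?_⟩
      · intro i hi; rw [h1 i hi, harg1 i hi]
      · rw [h2J, Nat.min_eq_left (by omega), Nat.min_eq_left (by omega), c2_succ,
            if_neg (by tauto)]

theorem inner_fold (A B : List Int) (startA : Bool) {J : ℕ} (hJ : J < B.length) :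
    ∀ (I : ℕ), I ≤ A.length → ∀ s, innerInv A B J 0 s →
      innerInv A B J I ((List.range I).foldl (aPair A B startA J) s) := by
  intro I
  induction I with
  | zero => intro _ s h; simpa using h
  | succ I ih =>
    intro hIn s h
    rw [List.range_succ, List.foldl_append]
    exact aPair_inv A B startA hJ (by omega) (ih (by omega) s h)

-- invariant of A's outer loop after iterations 0..J-1
def outerInv (A B : List Int) (J : ℕ) (s : List Int × List Int) : Prop :=
  s.1.length = A.length ∧ s.2.length = B.length ∧
  (∀ i < A.length, s.1.getD i 0 = c1 A B (min J i) i + 1) ∧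
  (∀ j < B.length, s.2.getD j 0 = if j < J then F2 A B j else 1)

theorem outer_to_inner (A B : List Int) {J : ℕ} (hJ : J < B.length)
    {s : List Int × List Int} (h : outerInv A B J s) : innerInv A B J 0 s := by
  obtain ⟨hl1, hl2, h1, h2⟩ := h
  refine ⟨hl1, hl2, ?_, ?_, ?_⟩
  · intro i hi; simpa using h1 i hi
  · intro j hj _; exact h2 j hj
  · have hx := h2 J hJ
    rw [if_neg (lt_irrefl J)] at hx
    rw [hx, Nat.zero_min]
    simp [c2]

theorem inner_to_outer (A B : List Int) {J : ℕ} (hJ : J < B.length)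
    {s : List Int × List Int} (h : innerInv A B J A.length s) : outerInv A B (J + 1) s := by
  obtain ⟨hl1, hl2, h1, h2, h2J⟩ := h
  refine ⟨hl1, hl2, ?_, ?_⟩
  · intro i hi
    have := h1 i hi
    rwa [if_pos hi] at this
  · intro j hj
    by_cases hje : j = J
    · subst hje
      rw [if_pos (by omega), h2J, F2_eq A B hJ, Nat.min_comm]
    · have := h2 j hj hje
      by_cases hlt : j < J
      · rw [if_pos (by omega)]; rwa [if_pos hlt] at this
      · rw [if_neg (by omega)]; rwa [if_neg hlt] at this

theorem outer_fold (A B : List Int) (startA : Bool) :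
    ∀ (J : ℕ), J ≤ B.length →
      outerInv A B J ((List.range J).foldl
        (fun s j => (List.range A.length).foldl (aPair A B startA j) s)
        (List.replicate A.length 1, List.replicate B.length 1)) := by
  intro J
  induction J with
  | zero =>
    intro _
    refine ⟨by simp, by simp, ?_, ?_⟩
    · intro i hi
      simp [List.getD_eq_getElem?_getD, List.getElem?_replicate, hi, c1]
    · intro j hj
      simp [List.getD_eq_getElem?_getD, List.getElem?_replicate, hj]
  | succ J ih =>
    intro hJ
    rw [List.range_succ, List.foldl_append]
    simp only [List.foldl_cons, List.foldl_nil]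
    exact inner_to_outer A B (by omega)
      (inner_fold A B startA (by omega) A.length (le_refl _) _
        (outer_to_inner A B (by omega) (ih (by omega))))

-- the final state of A's loop IS the pair of lists B builds
theorem final_state (A B : List Int) (startA : Bool) :
    ((List.range B.length).foldl
        (fun s j => (List.range A.length).foldl (aPair A B startA j) s)
        (List.replicate A.length 1, List.replicate B.length 1))
      = bb A B (max A.length B.length) := by
  obtain ⟨hl1, hl2, h1, h2⟩ := outer_fold A B startA B.length (le_refl _)
  obtain ⟨hb1, hb2⟩ := bb_len A B (max A.length B.length)
  refine Prod.ext (List.ext_getElem (by omega) ?_) (List.ext_getElem (by omega) ?_)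
  · intro i hi hbi
    have hi' : i < A.length := by omega
    rw [← List.getD_eq_getElem _ 0 hi, ← List.getD_eq_getElem _ 0 hbi, h1 i hi',
        bb_fin1 A B hi', F1_eq A B hi', Nat.min_comm]
  · intro j hj hbj
    have hj' : j < B.length := by omega
    rw [← List.getD_eq_getElem _ 0 hj, ← List.getD_eq_getElem _ 0 hbj, h2 j hj',
        bb_fin2 A B hj', if_pos hj']

-- running max over an appended list splits
theorem foldl_max_hoist (u : List Int) : ∀ a b : Int, u.foldl max (max a b) = max a (u.foldl max b) := by
  induction u with
  | nil => intro a b; rfl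
  | cons c u ih =>
    intro a b
    simp only [List.foldl_cons]
    rw [max_assoc]
    exact ih a (max b c)

theorem max_getD_append (x y : Int) (t u : List Int) :
    (PySem.List.max? ((x :: t) ++ y :: u) (fun v => v)).getD 0
      = max ((PySem.List.max? (x :: t) (fun v => v)).getD 0)
            ((PySem.List.max? (y :: u) (fun v => v)).getD 0) := by
  rw [List.cons_append, PySem.List.max?_id_cons, PySem.List.max?_id_cons, PySem.List.max?_id_cons]
  simp only [Option.getD_some]
  rw [List.foldl_append]
  simp only [List.foldl_cons, List.foldl_nil]
  exact foldl_max_hoist u _ y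

-- ===== VERDICT (by name: the statement is the Claim_ definition above) =====
theorem solve_spec : Claim_equal_solve := by
  intro A B startA _ hPre
  obtain ⟨hA, hB⟩ := hPre
  unfold Spec_solve solve solve_alt
  simp only []
  rw [final_state A B startA]
  obtain ⟨hb1, hb2⟩ := bb_len A B (max A.length B.length)
  obtain ⟨x, t, h1⟩ := List.exists_cons_of_ne_nil
    (show (bb A B (max A.length B.length)).1 ≠ [] by
      intro hc; rw [hc] at hb1; simp at hb1; cases A <;> simp_all)
  obtain ⟨y, u, h2⟩ := List.exists_cons_of_ne_nil
    (show (bb A B (max A.length B.length)).2 ≠ [] by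
      intro hc; rw [hc] at hb2; simp at hb2; cases B <;> simp_all)
  rw [show List.foldl (bStep A B A.length B.length) ([], []) (List.range (max A.length B.length))
        = bb A B (max A.length B.length) from rfl, h1, h2, max_getD_append]
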